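-- pv_equiv track=rewrite | github.com/Yogessh3/tcs-digital | tcs_dca_cq2.py | calcMaxSum
-- ===== SOURCE A (Python) =====
-- def calcMaxSum(array):
--     sum=0
--     for i in range(len(array)-2):
--         for j in range(len(array)-1):
--             newSum=array[i]+array[j]+array[j+1]
--             if newSum>sum:
--                 sum=newSum
--     return sum
-- ===== SOURCE B (Python) =====
-- def calcMaxSum(array):
--     n = len(array)
--     if n < 3:
--         return 0
--     best_single = max(array[:n - 2])
--     best_pair = max(x + y for x, y in zip(array, array[1:]))
--     return max(0, best_single + best_pair)
-- ===== Notes on version B (the rewrite author's own statement) =====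
-- stated objective: faster
-- what changed: Replaced the O(n^2) double loop by two independent linear maxima (max of array[:n-2] plus max adjacent-pair sum), clamped at 0, exploiting that the two loop indices are independent.
import Mathlib
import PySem

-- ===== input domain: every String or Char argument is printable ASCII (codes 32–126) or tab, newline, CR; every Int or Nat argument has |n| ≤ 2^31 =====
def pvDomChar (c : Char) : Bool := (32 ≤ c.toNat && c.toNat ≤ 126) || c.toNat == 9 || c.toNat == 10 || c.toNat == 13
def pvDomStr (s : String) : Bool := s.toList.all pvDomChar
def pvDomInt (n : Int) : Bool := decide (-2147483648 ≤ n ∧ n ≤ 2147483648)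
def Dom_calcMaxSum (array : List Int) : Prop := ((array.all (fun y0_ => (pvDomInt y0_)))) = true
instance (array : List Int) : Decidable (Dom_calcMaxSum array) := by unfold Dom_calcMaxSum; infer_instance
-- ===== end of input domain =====

-- B replaces A's O(n^2) double loop by two independent O(n) maxima (max single + max adjacent pair, clamped at 0).

-- ===== PORT A =====
def calcMaxSum (array : List Int) : Int :=
  (PySem.List.pyRange 0 ((array.length : Int) - 2) 1).foldl (fun sum i =>
    (PySem.List.pyRange 0 ((array.length : Int) - 1) 1).foldl (fun sum j =>
      let newSum := PySem.List.pyGetD array i 0 + PySem.List.pyGetD array j 0 +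
                    PySem.List.pyGetD array (j + 1) 0
      if newSum > sum then newSum else sum) sum) 0

-- ===== PORT B =====
-- Python max() on a nonempty list; only ever applied to nonempty lists here.
def pyMax : List Int → Int
  | [] => 0
  | x :: xs => xs.foldl max x

def calcMaxSum_alt (array : List Int) : Int :=
  if array.length < 3 then 0
  else
    max 0 (pyMax (array.take (array.length - 2)) +
           pyMax (List.zipWith (· + ·) array array.tail))

-- ===== PRECONDITION & SPEC =====
def Spec_calcMaxSum (array : List Int) (out : Int) : Prop := out = calcMaxSum_alt array
instance (array : List Int) (out : Int) : Decidable (Spec_calcMaxSum array out) := by unfold Spec_calcMaxSum; infer_instance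

-- ===== CLAIM (what is proved, stated in full; the proofs are below) =====
def Claim_equal_calcMaxSum : Prop := ∀ (array : List Int), Dom_calcMaxSum array → Spec_calcMaxSum array (calcMaxSum array)

-- ===== LEMMAS AND PROOFS =====

lemma foldl_max_shift (t : List Int) : ∀ (a b : Int), t.foldl max (max a b) = max a (t.foldl max b) := by
  induction t with
  | nil => intro a b; rfl
  | cons c t ih =>
    intro a b
    simp only [List.foldl_cons, max_assoc]
    exact ih a (max b c)

lemma foldl_max_cons' (h : Int) (t : List Int) (s0 : Int) :
    (h :: t).foldl max s0 = max s0 (t.foldl max h) := by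
  simp only [List.foldl_cons]
  have := foldl_max_shift t s0 h
  simpa using this

lemma foldl_max_add (t : List Int) : ∀ (x c : Int),
    (t.map (· + c)).foldl max (x + c) = t.foldl max x + c := by
  induction t with
  | nil => intro x c; rfl
  | cons h t ih =>
    intro x c
    simp only [List.map_cons, List.foldl_cons]
    rw [show max (x + c) (h + c) = max x h + c from max_add_add_right x h c]
    exact ih (max x h) c

lemma if_gt_eq_max (s a : Int) : (if a > s then a else s) = max s a := by
  split_ifs <;> omega

-- the inner index range, mapped through a[j]+a[j+1], is the list of adjacent-pair sums
lemma range_map_pairs (a : List Int) :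
    (PySem.List.pyRange 0 ((a.length : Int) - 1) 1).map
      (fun j => PySem.List.pyGetD a j 0 + PySem.List.pyGetD a (j + 1) 0)
    = List.zipWith (· + ·) a a.tail := by
  apply List.ext_getElem
  · simp only [List.length_map, PySem.List.length_pyRange_one, List.length_zipWith,
      List.length_tail]
    omega
  · intro k h1 h2
    have hk : k < a.length - 1 := by
      simp only [List.length_map, PySem.List.length_pyRange_one] at h1; omega
    have hk1 : k < a.length := by omega
    have hk2 : k + 1 < a.length := by omega
    simp only [List.getElem_map, PySem.List.getElem_pyRange_one, zero_add]
    rw [List.getElem_zipWith]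
    have hc : ((k : Int) + 1) = ((k + 1 : Nat) : Int) := by push_cast; ring
    have e1 : PySem.List.pyGetD a (k : Int) 0 = a[k] := by
      simp [List.getD_eq_getElem?_getD, List.getElem?_eq_getElem hk1]
    have e2 : PySem.List.pyGetD a ((k : Int) + 1) 0 = a[k + 1] := by
      rw [hc, PySem.List.pyGetD_natCast]
      simp [List.getD_eq_getElem?_getD, List.getElem?_eq_getElem hk2]
    rw [e1, e2, List.getElem_tail]

-- the outer index range, mapped through a[i], is the first n-2 elements
lemma range_map_singles (a : List Int) :
    (PySem.List.pyRange 0 ((a.length : Int) - 2) 1).map (fun i => PySem.List.pyGetD a i 0)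
    = a.take (a.length - 2) := by
  apply List.ext_getElem
  · simp only [List.length_map, PySem.List.length_pyRange_one, List.length_take]
    omega
  · intro k h1 h2
    have hk : k < a.length - 2 := by
      simp only [List.length_map, PySem.List.length_pyRange_one] at h1; omega
    have hk1 : k < a.length := by omega
    simp [PySem.List.getElem_pyRange_one, PySem.List.pyGetD_natCast,
      List.getD_eq_getElem?_getD, List.getElem?_eq_getElem hk1]

-- the inner loop computes max s0 (a[i] + best adjacent pair)
lemma inner_eq (a : List Int) (p : Int) (ps : List Int)
    (hzw : List.zipWith (· + ·) a a.tail = p :: ps) (x s0 : Int) :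
    (PySem.List.pyRange 0 ((a.length : Int) - 1) 1).foldl (fun sum j =>
      let newSum := x + PySem.List.pyGetD a j 0 + PySem.List.pyGetD a (j + 1) 0
      if newSum > sum then newSum else sum) s0
    = max s0 (pyMax (List.zipWith (· + ·) a a.tail) + x) := by
  have hfun : (fun (sum j : Int) =>
      let newSum := x + PySem.List.pyGetD a j 0 + PySem.List.pyGetD a (j + 1) 0
      if newSum > sum then newSum else sum)
      = fun sum j => max sum ((PySem.List.pyGetD a j 0 + PySem.List.pyGetD a (j + 1) 0) + x) := by
    funext s j
    simp only [if_gt_eq_max]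
    ring_nf
  rw [hfun, ← List.foldl_map]
  have hm : (PySem.List.pyRange 0 ((a.length : Int) - 1) 1).map
      (fun j => (PySem.List.pyGetD a j 0 + PySem.List.pyGetD a (j + 1) 0) + x)
      = (List.zipWith (· + ·) a a.tail).map (· + x) := by
    rw [← range_map_pairs]; simp [List.map_map, Function.comp]
  rw [hm, hzw]
  simp only [List.map_cons, foldl_max_cons' (p + x), foldl_max_add, pyMax]

-- ===== VERDICT (by name: the statement is the Claim_ definition above) =====
theorem calcMaxSum_spec : Claim_equal_calcMaxSum := by
  intro a _
  show calcMaxSum a = calcMaxSum_alt a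
  by_cases h3 : a.length < 3
  · have : ((a.length : Int) - 2) ≤ 0 := by omega
    simp [calcMaxSum, calcMaxSum_alt, h3, PySem.List.pyRange_one_eq_nil (by omega : ((a.length : Int) - 2) ≤ 0)]
  · -- n ≥ 3: both the take and the zipWith lists are nonempty
    have hn : 3 ≤ a.length := by omega
    obtain ⟨s, ss, hts⟩ : ∃ s ss, a.take (a.length - 2) = s :: ss := by
      cases hts : a.take (a.length - 2) with
      | nil => exfalso; have := congrArg List.length hts; simp at this; omega
      | cons s ss => exact ⟨s, ss, rfl⟩
    obtain ⟨p, ps, hzw⟩ : ∃ p ps, List.zipWith (· + ·) a a.tail = p :: ps := by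
      cases hzw : List.zipWith (· + ·) a a.tail with
      | nil =>
        exfalso; have := congrArg List.length hzw
        simp [List.length_zipWith, List.length_tail] at this; omega
      | cons p ps => exact ⟨p, ps, rfl⟩
    unfold calcMaxSum
    have hfun2 : (fun (sum i : Int) =>
        (PySem.List.pyRange 0 ((a.length : Int) - 1) 1).foldl (fun sum j =>
          let newSum := PySem.List.pyGetD a i 0 + PySem.List.pyGetD a j 0 +
                        PySem.List.pyGetD a (j + 1) 0
          if newSum > sum then newSum else sum) sum)
        = fun sum i => max sum
            (PySem.List.pyGetD a i 0 + (pyMax (List.zipWith (· + ·) a a.tail))) := by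
      funext s i
      rw [inner_eq a p ps hzw (PySem.List.pyGetD a i 0) s]
      ring_nf
    rw [hfun2, ← List.foldl_map]
    have hm2 : (PySem.List.pyRange 0 ((a.length : Int) - 2) 1).map
        (fun i => PySem.List.pyGetD a i 0 + pyMax (List.zipWith (· + ·) a a.tail))
        = (a.take (a.length - 2)).map (· + pyMax (List.zipWith (· + ·) a a.tail)) := by
      rw [← range_map_singles]; simp [List.map_map, Function.comp]
    rw [hm2, hts]
    simp only [List.map_cons,
      foldl_max_cons' (s + pyMax (List.zipWith (· + ·) a a.tail)), foldl_max_add]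
    simp [calcMaxSum_alt, h3, hts, pyMax]
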